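-- pv_equiv track=rewrite | github.com/kyovchev/bolt-task-addon | M5StickCPlus2-Arduino/GraphingTestTypeB/live_graph.py | colour_segments
-- ===== SOURCE A (Python) =====
-- def colour_segments(times, weights, warn, maxw):
--     """
--     Returns three lists of (x_array, y_array):
--       normal_segs, warning_segs, maxed_segs
--     Each segment is a continuous run of the same colour so we can plot them
--     with a single colour each.
--     """
--     normal_segs, warning_segs, maxed_segs = [], [], []
--
--     def category(w):
--         if w >= maxw:
--             return 2
--         if w >= warn:
--             return 1
--         return 0
--
--     if not times:
--         return normal_segs, warning_segs, maxed_segs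
--
--     seg_x, seg_y = [times[0]], [weights[0]]
--     cur_cat = category(weights[0])
--
--     for x, y in zip(times[1:], weights[1:]):
--         cat = category(y)
--         if cat == cur_cat:
--             seg_x.append(x)
--             seg_y.append(y)
--         else:
--             [normal_segs, warning_segs, maxed_segs][cur_cat].append(
--                 (seg_x, seg_y))
--             # overlap for continuity
--             seg_x, seg_y = [seg_x[-1], x], [seg_y[-1], y]
--             cur_cat = cat
--
--     [normal_segs, warning_segs, maxed_segs][cur_cat].append((seg_x, seg_y))
--     return normal_segs, warning_segs, maxed_segs
-- ===== SOURCE B (Python) =====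
-- def colour_segments(times, weights, warn, maxw):
--     normal_segs, warning_segs, maxed_segs = [], [], []
--     res = (normal_segs, warning_segs, maxed_segs)
--     if not times:
--         return res
--
--     def category(w):
--         return 2 if w >= maxw else 1 if w >= warn else 0
--
--     pts = list(zip(times, weights))
--     n = len(pts)
--     i = 0
--     while i < n:
--         c = category(pts[i][1])
--         j = i + 1
--         while j < n and category(pts[j][1]) == c:
--             j += 1
--         lo = i if i == 0 else i - 1  # one-point overlap with the previous run
--         res[c].append(([t for t, _ in pts[lo:j]], [w for _, w in pts[lo:j]]))
--         i = j
--     return res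
-- ===== Notes on version B (the rewrite author's own statement) =====
-- stated objective: alternative
-- what changed: Instead of folding point-by-point with a mutable current-segment accumulator, B first pairs the series, then a two-pointer scan finds each maximal same-category run and emits the slice pts[lo:j] (lo giving the one-point overlap) directly into the right bucket.
import Mathlib
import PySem

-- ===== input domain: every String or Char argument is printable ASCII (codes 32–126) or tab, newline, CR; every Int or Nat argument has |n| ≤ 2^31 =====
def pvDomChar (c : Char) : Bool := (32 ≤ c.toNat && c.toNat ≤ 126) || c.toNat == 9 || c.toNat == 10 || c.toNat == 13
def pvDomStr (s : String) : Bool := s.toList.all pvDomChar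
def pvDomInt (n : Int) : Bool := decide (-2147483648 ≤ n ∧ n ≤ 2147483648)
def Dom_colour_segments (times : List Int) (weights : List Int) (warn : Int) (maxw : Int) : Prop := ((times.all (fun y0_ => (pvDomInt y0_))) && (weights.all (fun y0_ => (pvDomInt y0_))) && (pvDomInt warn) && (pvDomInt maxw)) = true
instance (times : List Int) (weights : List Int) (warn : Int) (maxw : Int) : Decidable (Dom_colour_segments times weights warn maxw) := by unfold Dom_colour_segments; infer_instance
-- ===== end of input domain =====

-- B replaces A's point-by-point fold (mutable current segment + flush on colour change) by a
-- two-pointer scan over the zipped points that emits each maximal same-category run as a slice;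
-- same O(n) cost ("alternative").

-- ===== PORT A =====
-- category(w) — shared by both sources verbatim
def pvCat (warn maxw w : Int) : Int :=
  if w ≥ maxw then 2 else if w ≥ warn then 1 else 0

-- A's loop body: state = (normal, warning, maxed, seg_x, seg_y, cur_cat)
def pvAStep (warn maxw : Int)
    (st : List (List Int × List Int) × List (List Int × List Int) × List (List Int × List Int) ×
          List Int × List Int × Int) (p : Int × Int) :
    List (List Int × List Int) × List (List Int × List Int) × List (List Int × List Int) ×
    List Int × List Int × Int :=
  match st with
  | (ns, ws, ms, segx, segy, cur) =>
    let cat := pvCat warn maxw p.2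
    if cat = cur then (ns, ws, ms, segx ++ [p.1], segy ++ [p.2], cur)
    else
      ((if cur = 0 then ns ++ [(segx, segy)] else ns),
       (if cur = 1 then ws ++ [(segx, segy)] else ws),
       (if cur = 2 then ms ++ [(segx, segy)] else ms),
       [segx.getLastD 0, p.1], [segy.getLastD 0, p.2], cat)

-- A's trailing `[normal, warning, maxed][cur_cat].append((seg_x, seg_y))` + return
def pvAFinish
    (st : List (List Int × List Int) × List (List Int × List Int) × List (List Int × List Int) ×
          List Int × List Int × Int) :
    List (List Int × List Int) × List (List Int × List Int) × List (List Int × List Int) :=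
  match st with
  | (ns, ws, ms, segx, segy, cur) =>
    ((if cur = 0 then ns ++ [(segx, segy)] else ns),
     (if cur = 1 then ws ++ [(segx, segy)] else ws),
     (if cur = 2 then ms ++ [(segx, segy)] else ms))

def colour_segments (times : List Int) (weights : List Int) (warn : Int) (maxw : Int) :
    (List (List Int × List Int)) × (List (List Int × List Int)) × (List (List Int × List Int)) :=
  if times.isEmpty then ([], [], [])
  else
    pvAFinish ((times.tail.zip weights.tail).foldl (pvAStep warn maxw)
      ([], [], [], [times.headD 0], [weights.headD 0], pvCat warn maxw (weights.headD 0)))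

-- ===== PORT B =====
-- Source B's inner `while j < n and category(pts[j][1]) == c: j += 1`
def pvRunEnd (warn maxw : Int) (pts : List (Int × Int)) (c : Int) (j : Nat) : Nat :=
  if j < pts.length ∧ pvCat warn maxw (pts.getD j (0, 0)).2 = c then
    pvRunEnd warn maxw pts c (j + 1)
  else j
termination_by pts.length - j
decreasing_by omega

-- needed by pvBLoop's termination proof
theorem pvRunEnd_ge (warn maxw : Int) (pts : List (Int × Int)) (c : Int) (j : Nat) :
    j ≤ pvRunEnd warn maxw pts c j := by
  fun_induction pvRunEnd warn maxw pts c j with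
  | case1 j h ih => omega
  | case2 j h => omega

-- Source B's `res[c].append(seg)`
def pvPut (res : List (List Int × List Int) × List (List Int × List Int) × List (List Int × List Int))
    (c : Int) (seg : List Int × List Int) :
    List (List Int × List Int) × List (List Int × List Int) × List (List Int × List Int) :=
  (if c = 0 then res.1 ++ [seg] else res.1,
   if c = 1 then res.2.1 ++ [seg] else res.2.1,
   if c = 2 then res.2.2 ++ [seg] else res.2.2)

-- Source B's outer while loop over run starts
def pvBLoop (warn maxw : Int) (pts : List (Int × Int)) (i : Nat)
    (res : List (List Int × List Int) × List (List Int × List Int) × List (List Int × List Int)) :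
    List (List Int × List Int) × List (List Int × List Int) × List (List Int × List Int) :=
  if h : i < pts.length then
    let c := pvCat warn maxw (pts.getD i (0, 0)).2
    let j := pvRunEnd warn maxw pts c (i + 1)
    let lo := if i = 0 then i else i - 1
    pvBLoop warn maxw pts j
      (pvPut res c (((pts.drop lo).take (j - lo)).map Prod.fst,
                    ((pts.drop lo).take (j - lo)).map Prod.snd))
  else res
termination_by pts.length - i
decreasing_by
  have := pvRunEnd_ge warn maxw pts (pvCat warn maxw (pts.getD i (0, 0)).2) (i + 1)
  omega

def colour_segments_alt (times : List Int) (weights : List Int) (warn : Int) (maxw : Int) :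
    (List (List Int × List Int)) × (List (List Int × List Int)) × (List (List Int × List Int)) :=
  if times.isEmpty then ([], [], [])
  else pvBLoop warn maxw (times.zip weights) 0 ([], [], [])

-- ===== PRECONDITION & SPEC =====
-- Pre_ excludes exactly the inputs where A raises IndexError on weights[0]:
-- times nonempty with weights empty.
def Pre_colour_segments (times : List Int) (weights : List Int) (warn : Int) (maxw : Int) : Prop :=
  times = [] ∨ weights ≠ []
instance (times : List Int) (weights : List Int) (warn : Int) (maxw : Int) :
    Decidable (Pre_colour_segments times weights warn maxw) := by
  unfold Pre_colour_segments; infer_instance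

def pvWitness_colour_segments : List Int × List Int × Int × Int :=
  ([0, 1, 2, 3], [1, 5, 9, 2], 4, 8)

def Spec_colour_segments (times : List Int) (weights : List Int) (warn : Int) (maxw : Int)
    (out : (List (List Int × List Int)) × (List (List Int × List Int)) × (List (List Int × List Int))) :
    Prop := out = colour_segments_alt times weights warn maxw
instance (times : List Int) (weights : List Int) (warn : Int) (maxw : Int)
    (out : (List (List Int × List Int)) × (List (List Int × List Int)) × (List (List Int × List Int))) :
    Decidable (Spec_colour_segments times weights warn maxw out) := by
  unfold Spec_colour_segments; infer_instance

-- ===== CLAIM (what is proved, stated in full; the proofs are below) =====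
def Claim_equal_colour_segments : Prop := ∀ (times : List Int) (weights : List Int) (warn : Int) (maxw : Int), Dom_colour_segments times weights warn maxw → Pre_colour_segments times weights warn maxw → Spec_colour_segments times weights warn maxw (colour_segments times weights warn maxw)


-- ===== LEMMAS AND PROOFS =====

-- slice pts[lo:b+1] grows by pts[b] on the right
theorem pvSlice_extend (pts : List (Int × Int)) (lo b : Nat) (hlo : lo ≤ b)
    (hb : b < pts.length) :
    (pts.drop lo).take (b + 1 - lo) = (pts.drop lo).take (b - lo) ++ [pts.getD b (0, 0)] := by
  have h1 : b + 1 - lo = (b - lo) + 1 := by omega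
  rw [h1, List.take_add_one]
  have h2 : (pts.drop lo)[b - lo]? = some (pts.getD b (0, 0)) := by
    rw [List.getElem?_drop]
    have : lo + (b - lo) = b := by omega
    rw [this, List.getElem?_eq_getElem hb, List.getD_eq_getElem pts (0,0) hb]
  simp [h2]

-- value of runEnd on a run [j, e) followed by a boundary at e
theorem pvRunEnd_eq (warn maxw : Int) (pts : List (Int × Int)) (c : Int) (e : Nat)
    (hend : pts.length = e ∨ (e < pts.length ∧ pvCat warn maxw (pts.getD e (0, 0)).2 ≠ c)) :
    ∀ fuel j, e - j ≤ fuel → j ≤ e →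
    (∀ k, j ≤ k → k < e → pvCat warn maxw (pts.getD k (0, 0)).2 = c) →
    pvRunEnd warn maxw pts c j = e := by
  intro fuel
  induction fuel with
  | zero =>
    intro j hf hje hrun
    have hje' : j = e := by omega
    rw [pvRunEnd]
    have : ¬ (j < pts.length ∧ pvCat warn maxw (pts.getD j (0, 0)).2 = c) := by
      intro hcon
      rcases hend with h1 | h2
      · omega
      · exact h2.2 (hje' ▸ hcon.2)
    rw [if_neg this]
    exact hje'
  | succ f ihf =>
    intro j hf hje hrun
    rcases Nat.lt_or_ge j e with hlt | hge
    · rw [pvRunEnd]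
      have hcond : j < pts.length ∧ pvCat warn maxw (pts.getD j (0, 0)).2 = c := by
        constructor
        · rcases hend with h1 | h2 <;> omega
        · exact hrun j (le_refl j) hlt
      rw [if_pos hcond]
      exact ihf (j + 1) (by omega) (by omega) (fun k h1 h2 => hrun k (by omega) h2)
    · have hje' : j = e := by omega
      rw [pvRunEnd]
      have : ¬ (j < pts.length ∧ pvCat warn maxw (pts.getD j (0, 0)).2 = c) := by
        intro hcon
        rcases hend with h1 | h2
        · omega
        · exact h2.2 (hje' ▸ hcon.2)
      rw [if_neg this]
      exact hje'

-- one unfolding of Source B's outer loop when i is in range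
theorem pvBLoop_unfold (warn maxw : Int) (pts : List (Int × Int)) (i : Nat)
    (res : List (List Int × List Int) × List (List Int × List Int) × List (List Int × List Int))
    (h : i < pts.length) :
    pvBLoop warn maxw pts i res
      = pvBLoop warn maxw pts
          (pvRunEnd warn maxw pts (pvCat warn maxw (pts.getD i (0, 0)).2) (i + 1))
          (pvPut res (pvCat warn maxw (pts.getD i (0, 0)).2)
            (((pts.drop (if i = 0 then i else i - 1)).take
                (pvRunEnd warn maxw pts (pvCat warn maxw (pts.getD i (0, 0)).2) (i + 1)
                  - (if i = 0 then i else i - 1))).map Prod.fst,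
             ((pts.drop (if i = 0 then i else i - 1)).take
                (pvRunEnd warn maxw pts (pvCat warn maxw (pts.getD i (0, 0)).2) (i + 1)
                  - (if i = 0 then i else i - 1))).map Prod.snd)) := by
  rw [pvBLoop, dif_pos h]

theorem pvBLoop_stop (warn maxw : Int) (pts : List (Int × Int)) (i : Nat)
    (res : List (List Int × List Int) × List (List Int × List Int) × List (List Int × List Int))
    (h : ¬ i < pts.length) :
    pvBLoop warn maxw pts i res = res := by
  rw [pvBLoop, dif_neg h]

-- main invariant: A's fold from mid-run position m (run started at i, accumulated
-- segment = pts[lo i : m+1]) finishes to the same triple as B's loop resumed at i.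
theorem pvMain (warn maxw : Int) (pts : List (Int × Int)) :
    ∀ fuel m i rn rw rm, pts.length - m ≤ fuel → i ≤ m → m < pts.length →
    (∀ k, i ≤ k → k ≤ m →
      pvCat warn maxw (pts.getD k (0, 0)).2 = pvCat warn maxw (pts.getD i (0, 0)).2) →
    pvAFinish ((pts.drop (m + 1)).foldl (pvAStep warn maxw)
      (rn, rw, rm,
       ((pts.drop (if i = 0 then i else i - 1)).take (m + 1 - (if i = 0 then i else i - 1))).map Prod.fst,
       ((pts.drop (if i = 0 then i else i - 1)).take (m + 1 - (if i = 0 then i else i - 1))).map Prod.snd,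
       pvCat warn maxw (pts.getD i (0, 0)).2))
    = pvBLoop warn maxw pts i (rn, rw, rm) := by
  intro fuel
  induction fuel with
  | zero => intro m i rn rw rm hf him hm hrun; omega
  | succ f ih =>
    intro m i rn rw rm hf him hm hrun
    set lo := if i = 0 then i else i - 1 with hlo
    have hloi : lo ≤ i := by rw [hlo]; split <;> omega
    set c := pvCat warn maxw (pts.getD i (0, 0)).2 with hc
    rcases Nat.lt_or_ge (m + 1) pts.length with hm1 | hm1
    · -- more points after m
      have hdrop : pts.drop (m + 1) = pts.getD (m + 1) (0, 0) :: pts.drop (m + 2) := by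
        rw [List.getD_eq_getElem pts (0,0) hm1, List.drop_eq_getElem_cons hm1]
      rw [hdrop, List.foldl_cons]
      by_cases hcat : pvCat warn maxw (pts.getD (m + 1) (0, 0)).2 = c
      · -- same category: segment extends, stay in the same run
        have hstep : pvAStep warn maxw
            (rn, rw, rm,
             ((pts.drop lo).take (m + 1 - lo)).map Prod.fst,
             ((pts.drop lo).take (m + 1 - lo)).map Prod.snd, c)
            (pts.getD (m + 1) (0, 0))
            = (rn, rw, rm,
               ((pts.drop lo).take (m + 2 - lo)).map Prod.fst,
               ((pts.drop lo).take (m + 2 - lo)).map Prod.snd, c) := by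
          simp only [pvAStep, hcat, if_true]
          rw [pvSlice_extend pts lo (m + 1) (by omega) hm1]
          simp
        rw [hstep]
        have := ih (m + 1) i rn rw rm (by omega) (by omega) hm1
          (by intro k hk1 hk2
              rcases Nat.lt_or_ge k (m + 1) with h' | h'
              · exact hrun k hk1 (by omega)
              · have : k = m + 1 := by omega
                rw [this]; exact hcat)
        rw [← hc, ← hlo] at this
        exact this
      · -- category change: A flushes = B emits the run, both restart at m+1
        have hlast_x : (((pts.drop lo).take (m + 1 - lo)).map Prod.fst).getLastD 0
            = (pts.getD m (0, 0)).1 := by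
          rw [pvSlice_extend pts lo m (hloi.trans him) (by omega)]
          simp
        have hlast_y : (((pts.drop lo).take (m + 1 - lo)).map Prod.snd).getLastD 0
            = (pts.getD m (0, 0)).2 := by
          rw [pvSlice_extend pts lo m (hloi.trans him) (by omega)]
          simp
        have hstep : pvAStep warn maxw
            (rn, rw, rm,
             ((pts.drop lo).take (m + 1 - lo)).map Prod.fst,
             ((pts.drop lo).take (m + 1 - lo)).map Prod.snd, c)
            (pts.getD (m + 1) (0, 0))
            = ((if c = 0 then rn ++ [(((pts.drop lo).take (m + 1 - lo)).map Prod.fst,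
                                      ((pts.drop lo).take (m + 1 - lo)).map Prod.snd)] else rn),
               (if c = 1 then rw ++ [(((pts.drop lo).take (m + 1 - lo)).map Prod.fst,
                                      ((pts.drop lo).take (m + 1 - lo)).map Prod.snd)] else rw),
               (if c = 2 then rm ++ [(((pts.drop lo).take (m + 1 - lo)).map Prod.fst,
                                      ((pts.drop lo).take (m + 1 - lo)).map Prod.snd)] else rm),
               [(pts.getD m (0, 0)).1, (pts.getD (m + 1) (0, 0)).1],
               [(pts.getD m (0, 0)).2, (pts.getD (m + 1) (0, 0)).2],
               pvCat warn maxw (pts.getD (m + 1) (0, 0)).2) := by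
          simp only [pvAStep, hcat, if_false, hlast_x, hlast_y]
        rw [hstep]
        -- the new two-point segment is the slice pts[m : m+2]
        have hseg2 : (pts.drop m).take 2
            = [pts.getD m (0, 0), pts.getD (m + 1) (0, 0)] := by
          have d1 : pts.drop m = pts.getD m (0, 0) :: pts.drop (m + 1) := by
            rw [List.getD_eq_getElem pts (0, 0) (by omega), List.drop_eq_getElem_cons (by omega)]
          rw [d1, hdrop]
          rfl
        -- B's runEnd for this run is m+1
        have hre : pvRunEnd warn maxw pts c (i + 1) = m + 1 := by
          exact pvRunEnd_eq warn maxw pts c (m + 1) (Or.inr ⟨hm1, hcat⟩) (m + 1) (i + 1)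
            (by omega) (by omega) (fun k hk1 hk2 => hrun k (by omega) (by omega))
        have := ih (m + 1) (m + 1) (if c = 0 then rn ++ [(((pts.drop lo).take (m + 1 - lo)).map Prod.fst,
                                      ((pts.drop lo).take (m + 1 - lo)).map Prod.snd)] else rn)
              (if c = 1 then rw ++ [(((pts.drop lo).take (m + 1 - lo)).map Prod.fst,
                                      ((pts.drop lo).take (m + 1 - lo)).map Prod.snd)] else rw)
              (if c = 2 then rm ++ [(((pts.drop lo).take (m + 1 - lo)).map Prod.fst,
                                      ((pts.drop lo).take (m + 1 - lo)).map Prod.snd)] else rm)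
              (by omega) (le_refl _) hm1
              (by
                intro k hk1 hk2
                have hk : k = m + 1 := by omega
                subst hk
                rfl)
        simp only [show (if m + 1 = 0 then m + 1 else m + 1 - 1) = m from by simp,
          show m + 1 + 1 = m + 2 from by omega, show m + 2 - m = 2 from by omega,
          hseg2, List.map_cons, List.map_nil] at this
        rw [this]
        rw [pvBLoop_unfold warn maxw pts i (rn, rw, rm) (by omega)]
        rw [← hc, ← hlo, hre]
        simp only [pvPut]
    · -- m is the last point: A's trailing flush = B's last run
      have hdrop : pts.drop (m + 1) = [] := List.drop_eq_nil_of_le (by omega)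
      rw [hdrop, List.foldl_nil]
      have hre : pvRunEnd warn maxw pts c (i + 1) = m + 1 := by
        exact pvRunEnd_eq warn maxw pts c (m + 1) (Or.inl (by omega)) (m + 1) (i + 1)
          (by omega) (by omega) (fun k hk1 hk2 => hrun k (by omega) (by omega))
      rw [pvBLoop_unfold warn maxw pts i (rn, rw, rm) (by omega)]
      rw [← hc, ← hlo, hre]
      rw [pvBLoop_stop warn maxw pts (m + 1) _ (by omega)]
      simp [pvAFinish, pvPut]

-- ===== VERDICT (by name: the statement is the Claim_ definition above) =====
theorem colour_segments_spec : Claim_equal_colour_segments := by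
  intro times weights warn maxw _hdom hpre
  unfold Spec_colour_segments
  match times, weights with
  | [], _ => rfl
  | t :: ts, [] =>
    exact absurd hpre (by simp [Pre_colour_segments])
  | t :: ts, w :: ws =>
    have h := pvMain warn maxw ((t, w) :: ts.zip ws) (((t, w) :: ts.zip ws).length)
      0 0 [] [] [] (le_refl _) (le_refl 0) (by simp)
      (by
        intro k h1 h2
        have hk : k = 0 := by omega
        simp [hk])
    simp only [colour_segments, colour_segments_alt, List.isEmpty_cons, List.zip_cons_cons,
      Bool.false_eq_true, if_false]
    simpa using h
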